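-- pv_equiv track=rewrite | github.com/spartan8806/atles | atles/tools.py | analyze_code_complexity
-- ===== SOURCE A (Python) =====
-- from typing import Any, Dict, List, Optional, Union, Callable, Type, get_type_hints
--
-- def analyze_code_complexity(code: str) -> Dict[str, Any]:
--     """Analyze code complexity metrics."""
--     lines = code.split('\n')
--
--     metrics = {
--         "total_lines": len(lines),
--         "code_lines": 0,
--         "comment_lines": 0,
--         "blank_lines": 0,
--         "function_count": 0,
--         "class_count": 0,
--         "complexity_score": 0
--     }
--
--     for line in lines:
--         stripped = line.strip()
--         if not stripped:
--             metrics["blank_lines"] += 1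
--         elif stripped.startswith('#') or stripped.startswith('//'):
--             metrics["comment_lines"] += 1
--         else:
--             metrics["code_lines"] += 1
--             if stripped.startswith('def ') or stripped.startswith('function '):
--                 metrics["function_count"] += 1
--             elif stripped.startswith('class '):
--                 metrics["class_count"] += 1
--
--     # Calculate complexity score (simplified)
--     metrics["complexity_score"] = min(100, max(0,
--         metrics["function_count"] * 5 +
--         metrics["class_count"] * 3 +
--         metrics["code_lines"] // 10
--     ))
--
--     return metrics
-- ===== SOURCE B (Python) =====
-- def analyze_code_complexity(code: str):
--     """Analyze code complexity metrics (independent counting passes)."""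
--     lines = code.split('\n')
--     stripped = [line.strip() for line in lines]
--
--     total = len(lines)
--     blank = sum(1 for s in stripped if not s)
--     comment = sum(1 for s in stripped if s and (s.startswith('#') or s.startswith('//')))
--     code_lines = total - blank - comment
--     functions = sum(1 for s in stripped if s.startswith('def ') or s.startswith('function '))
--     classes = sum(1 for s in stripped if s.startswith('class '))
--
--     score = min(100, max(0, functions * 5 + classes * 3 + code_lines // 10))
--
--     return {
--         "total_lines": total,
--         "code_lines": code_lines,
--         "comment_lines": comment,
--         "blank_lines": blank,
--         "function_count": functions,
--         "class_count": classes,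
--         "complexity_score": score,
--     }
-- ===== Notes on version B (the rewrite author's own statement) =====
-- stated objective: simpler
-- what changed: A's single fused loop that increments dict counters per line is replaced by independent counting passes over the stripped lines (blank and comment counted directly, code lines derived as total - blank - comment, def/function and class counted by bare prefix tests), then the same min/max score formula.
import Mathlib
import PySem

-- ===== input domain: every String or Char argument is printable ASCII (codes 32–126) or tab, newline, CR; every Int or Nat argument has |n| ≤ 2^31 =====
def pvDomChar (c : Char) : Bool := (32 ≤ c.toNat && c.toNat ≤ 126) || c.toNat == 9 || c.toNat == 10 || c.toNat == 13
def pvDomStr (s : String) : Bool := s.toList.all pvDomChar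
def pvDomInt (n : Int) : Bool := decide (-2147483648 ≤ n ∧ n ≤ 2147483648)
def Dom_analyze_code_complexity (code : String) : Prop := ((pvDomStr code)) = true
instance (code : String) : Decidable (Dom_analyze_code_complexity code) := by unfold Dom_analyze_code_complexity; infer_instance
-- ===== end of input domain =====

-- B replaces A's single fused counting loop by independent counting passes (blank/comment
-- counted directly, code lines derived as total − blank − comment); objective: simpler.

-- ===== PORT A =====
-- A's loop body, one step per line (literal transliteration of the for-loop body).
def pvStepA (m : PySem.Dict String Int) (line : String) : PySem.Dict String Int :=
  let stripped := PySem.Str.strip line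
  if stripped == "" then m.modify "blank_lines" 0 (· + 1)
  else if PySem.Str.startswith stripped "#" || PySem.Str.startswith stripped "//" then
    m.modify "comment_lines" 0 (· + 1)
  else
    let m := m.modify "code_lines" 0 (· + 1)
    if PySem.Str.startswith stripped "def " || PySem.Str.startswith stripped "function " then
      m.modify "function_count" 0 (· + 1)
    else if PySem.Str.startswith stripped "class " then
      m.modify "class_count" 0 (· + 1)
    else m

def analyze_code_complexity (code : String) : List (String × Int) :=
  -- code.split('\n'): split? is some for the nonempty separator "\n"; .getD [] is never used
  let lines := (PySem.Str.split? code "\n").getD []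
  let metrics : PySem.Dict String Int := PySem.Dict.ofList
    [("total_lines", (lines.length : Int)), ("code_lines", 0), ("comment_lines", 0),
     ("blank_lines", 0), ("function_count", 0), ("class_count", 0), ("complexity_score", 0)]
  let metrics := lines.foldl pvStepA metrics
  let metrics := metrics.insert "complexity_score"
    (min 100 (max 0 (metrics.getD "function_count" 0 * 5 + metrics.getD "class_count" 0 * 3 +
      PySem.Int.floordiv (metrics.getD "code_lines" 0) 10)))
  metrics.items

-- ===== PORT B =====
def analyze_code_complexity_alt (code : String) : List (String × Int) :=
  let lines := (PySem.Str.split? code "\n").getD []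
  let stripped := lines.map PySem.Str.strip
  let total : Int := lines.length
  let blank : Int := stripped.countP (fun s => s == "")
  let comment : Int := stripped.countP
    (fun s => !(s == "") && (PySem.Str.startswith s "#" || PySem.Str.startswith s "//"))
  let codeLines : Int := total - blank - comment
  let functions : Int := stripped.countP
    (fun s => PySem.Str.startswith s "def " || PySem.Str.startswith s "function ")
  let classes : Int := stripped.countP (fun s => PySem.Str.startswith s "class ")
  let score : Int := min 100 (max 0 (functions * 5 + classes * 3 + PySem.Int.floordiv codeLines 10))
  [("total_lines", total), ("code_lines", codeLines), ("comment_lines", comment),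
   ("blank_lines", blank), ("function_count", functions), ("class_count", classes),
   ("complexity_score", score)]

-- ===== PRECONDITION & SPEC =====
def Spec_analyze_code_complexity (code : String) (out : List (String × Int)) : Prop := out = analyze_code_complexity_alt code
instance (code : String) (out : List (String × Int)) : Decidable (Spec_analyze_code_complexity code out) := by unfold Spec_analyze_code_complexity; infer_instance

-- ===== CLAIM (what is proved, stated in full; the proofs are below) =====
def Claim_equal_analyze_code_complexity : Prop := ∀ (code : String), Dom_analyze_code_complexity code → Spec_analyze_code_complexity code (analyze_code_complexity code)

-- ===== LEMMAS AND PROOFS =====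

-- line classifiers (on the raw line, stripping inside)
def pB (l : String) : Bool := PySem.Str.strip l == ""
def pP (l : String) : Bool :=
  PySem.Str.startswith (PySem.Str.strip l) "#" || PySem.Str.startswith (PySem.Str.strip l) "//"
def pK (l : String) : Bool := !pB l && !pP l
def pF (l : String) : Bool :=
  PySem.Str.startswith (PySem.Str.strip l) "def " || PySem.Str.startswith (PySem.Str.strip l) "function "
def pL (l : String) : Bool := PySem.Str.startswith (PySem.Str.strip l) "class "

lemma sw_excl (s : String) (p : String) (hp : p ∈ ["def ", "function ", "class "])
    (h : PySem.Str.startswith s p = true) :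
    (s == "") = false ∧ PySem.Str.startswith s "#" = false ∧ PySem.Str.startswith s "//" = false := by
  simp only [PySem.Str.startswith_eq] at h
  rw [PySem.Chars.startswith_iff] at h
  obtain ⟨t, ht⟩ := h
  fin_cases hp <;>
  · refine ⟨?_, ?_, ?_⟩
    · rw [beq_eq_false_iff_ne]; intro he; subst he; simp at ht
    all_goals
      simp only [PySem.Str.startswith_eq]; rw [Bool.eq_false_iff]; intro h'
      rw [PySem.Chars.startswith_iff] at h'
      obtain ⟨u, hu⟩ := h'
      rw [← ht] at hu
      simp at hu

lemma pF_imp_pK (l : String) (h : pF l = true) : pK l = true := by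
  unfold pF at h
  rcases Bool.or_eq_true_iff.mp h with h | h <;>
  · obtain ⟨h1, h2, h3⟩ := sw_excl _ _ (by simp) h
    simp only [pK, pB, pP, h1, Bool.not_false, Bool.true_and, Bool.not_eq_true', Bool.or_eq_false_iff]
    exact ⟨by simpa using h2, by simpa using h3⟩

lemma pL_imp_pK (l : String) (h : pL l = true) : pK l = true := by
  obtain ⟨h1, h2, h3⟩ := sw_excl _ _ (by simp) h
  simp only [pK, pB, pP, h1, Bool.not_false, Bool.true_and, Bool.not_eq_true', Bool.or_eq_false_iff]
  exact ⟨by simpa using h2, by simpa using h3⟩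

lemma pL_imp_not_pF (l : String) (h : pL l = true) : pF l = false := by
  unfold pL at h
  simp only [PySem.Str.startswith_eq] at h
  rw [PySem.Chars.startswith_iff] at h
  obtain ⟨t, ht⟩ := h
  unfold pF
  rw [Bool.or_eq_false_iff]
  constructor <;>
  · simp only [PySem.Str.startswith_eq]; rw [Bool.eq_false_iff]; intro h'
    rw [PySem.Chars.startswith_iff] at h'
    obtain ⟨u, hu⟩ := h'
    rw [← ht] at hu
    simp at hu

-- the loop invariant: folding A's step over the lines adds the per-category counts
lemma foldA (ls : List String) (n ck cm b f cl sc : Int) :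
    ls.foldl pvStepA (PySem.Dict.mk
      [("total_lines", n), ("code_lines", ck), ("comment_lines", cm), ("blank_lines", b),
       ("function_count", f), ("class_count", cl), ("complexity_score", sc)]) =
    PySem.Dict.mk
      [("total_lines", n), ("code_lines", ck + (ls.countP pK : Int)),
       ("comment_lines", cm + (ls.countP (fun l => !pB l && pP l) : Int)),
       ("blank_lines", b + (ls.countP pB : Int)),
       ("function_count", f + (ls.countP (fun l => pK l && pF l) : Int)),
       ("class_count", cl + (ls.countP (fun l => pK l && !pF l && pL l) : Int)),
       ("complexity_score", sc)] := by
  induction ls generalizing ck cm b f cl with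
  | nil => simp
  | cons l ls ih =>
    rw [List.foldl_cons]
    by_cases hB : pB l = true
    · have hstep : pvStepA (PySem.Dict.mk
          [("total_lines", n), ("code_lines", ck), ("comment_lines", cm), ("blank_lines", b),
           ("function_count", f), ("class_count", cl), ("complexity_score", sc)]) l =
          PySem.Dict.mk
          [("total_lines", n), ("code_lines", ck), ("comment_lines", cm), ("blank_lines", b + 1),
           ("function_count", f), ("class_count", cl), ("complexity_score", sc)] := by
        unfold pB at hB
        simp [pvStepA, hB, PySem.Dict.modify, PySem.Dict.insert, PySem.Dict.getD,
          PySem.Dict.get?, PySem.Dict.contains]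
      rw [hstep, ih]
      have hK : pK l = false := by simp [pK, hB]
      simp [hB, hK]
      omega
    · by_cases hP : pP l = true
      · have hstep : pvStepA (PySem.Dict.mk
            [("total_lines", n), ("code_lines", ck), ("comment_lines", cm), ("blank_lines", b),
             ("function_count", f), ("class_count", cl), ("complexity_score", sc)]) l =
            PySem.Dict.mk
            [("total_lines", n), ("code_lines", ck), ("comment_lines", cm + 1), ("blank_lines", b),
             ("function_count", f), ("class_count", cl), ("complexity_score", sc)] := by
          unfold pB at hB; unfold pP at hP
          simp_all [pvStepA, PySem.Dict.modify, PySem.Dict.insert, PySem.Dict.getD,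
            PySem.Dict.get?, PySem.Dict.contains]
        rw [hstep, ih]
        have hK : pK l = false := by simp [pK, hP]
        simp [hB, hP, hK]
        omega
      · have hK : pK l = true := by simp [pK, hB, hP]
        by_cases hF : pF l = true
        · have hstep : pvStepA (PySem.Dict.mk
              [("total_lines", n), ("code_lines", ck), ("comment_lines", cm), ("blank_lines", b),
               ("function_count", f), ("class_count", cl), ("complexity_score", sc)]) l =
              PySem.Dict.mk
              [("total_lines", n), ("code_lines", ck + 1), ("comment_lines", cm), ("blank_lines", b),
               ("function_count", f + 1), ("class_count", cl), ("complexity_score", sc)] := by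
            unfold pB at hB; unfold pP at hP; unfold pF at hF
            simp_all [pvStepA, PySem.Dict.modify, PySem.Dict.insert, PySem.Dict.getD,
              PySem.Dict.get?, PySem.Dict.contains]
          rw [hstep, ih]
          simp [hB, hP, hK, hF]
          omega
        · by_cases hL : pL l = true
          · have hstep : pvStepA (PySem.Dict.mk
                [("total_lines", n), ("code_lines", ck), ("comment_lines", cm), ("blank_lines", b),
                 ("function_count", f), ("class_count", cl), ("complexity_score", sc)]) l =
                PySem.Dict.mk
                [("total_lines", n), ("code_lines", ck + 1), ("comment_lines", cm), ("blank_lines", b),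
                 ("function_count", f), ("class_count", cl + 1), ("complexity_score", sc)] := by
              unfold pB at hB; unfold pP at hP; unfold pF at hF; unfold pL at hL
              simp_all [pvStepA, PySem.Dict.modify, PySem.Dict.insert, PySem.Dict.getD,
                PySem.Dict.get?, PySem.Dict.contains]
            rw [hstep, ih]
            simp [hB, hP, hK, hF, hL]
            omega
          · have hstep : pvStepA (PySem.Dict.mk
                [("total_lines", n), ("code_lines", ck), ("comment_lines", cm), ("blank_lines", b),
                 ("function_count", f), ("class_count", cl), ("complexity_score", sc)]) l =
                PySem.Dict.mk
                [("total_lines", n), ("code_lines", ck + 1), ("comment_lines", cm), ("blank_lines", b),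
                 ("function_count", f), ("class_count", cl), ("complexity_score", sc)] := by
              unfold pB at hB; unfold pP at hP; unfold pF at hF; unfold pL at hL
              simp_all [pvStepA, PySem.Dict.modify, PySem.Dict.insert, PySem.Dict.getD,
                PySem.Dict.get?, PySem.Dict.contains]
            rw [hstep, ih]
            simp [hB, hP, hK, hF, hL]
            omega

-- the three categories partition the lines
lemma partitionP (ls : List String) :
    ls.countP pB + ls.countP (fun l => !pB l && pP l) + ls.countP pK = ls.length := by
  induction ls with
  | nil => simp
  | cons l ls ih =>
    simp only [List.countP_cons, List.length_cons]
    by_cases hB : pB l = true <;> by_cases hP : pP l = true <;>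
      simp [pK, hB, hP] <;> omega

-- ===== VERDICT (by name: the statement is the Claim_ definition above) =====
theorem analyze_code_complexity_spec : Claim_equal_analyze_code_complexity := by
  unfold Claim_equal_analyze_code_complexity
  intro code _
  unfold Spec_analyze_code_complexity analyze_code_complexity analyze_code_complexity_alt
  have hofl : ∀ (n : Int), PySem.Dict.ofList
      [("total_lines", n), ("code_lines", (0:Int)), ("comment_lines", 0), ("blank_lines", 0),
       ("function_count", 0), ("class_count", 0), ("complexity_score", 0)] =
      PySem.Dict.mk
      [("total_lines", n), ("code_lines", 0), ("comment_lines", 0), ("blank_lines", 0),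
       ("function_count", 0), ("class_count", 0), ("complexity_score", 0)] := fun _ => rfl
  set ls := (PySem.Str.split? code "\n").getD [] with hls
  simp only [hofl, foldA]
  have hmapB : (ls.map PySem.Str.strip).countP (fun s => s == "") = ls.countP pB := by
    rw [List.countP_map]; rfl
  have hmapC : (ls.map PySem.Str.strip).countP
      (fun s => !(s == "") && (PySem.Str.startswith s "#" || PySem.Str.startswith s "//")) =
      ls.countP (fun l => !pB l && pP l) := by
    rw [List.countP_map]; rfl
  have hmapF : (ls.map PySem.Str.strip).countP
      (fun s => PySem.Str.startswith s "def " || PySem.Str.startswith s "function ") =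
      ls.countP pF := by
    rw [List.countP_map]; rfl
  have hmapL : (ls.map PySem.Str.strip).countP (fun s => PySem.Str.startswith s "class ") =
      ls.countP pL := by
    rw [List.countP_map]; rfl
  have hF : ls.countP (fun l => pK l && pF l) = ls.countP pF := by
    apply List.countP_congr
    intro l _
    by_cases h : pF l = true
    · simp [h, pF_imp_pK l h]
    · simp [Bool.eq_false_iff.mpr h]
  have hL : ls.countP (fun l => pK l && !pF l && pL l) = ls.countP pL := by
    apply List.countP_congr
    intro l _
    by_cases h : pL l = true
    · simp [h, pL_imp_pK l h, pL_imp_not_pF l h]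
    · simp [Bool.eq_false_iff.mpr h]
  have hpart := partitionP ls
  have hcode : (0:Int) + (ls.countP pK : Int) =
      (ls.length : Int) - (ls.countP pB : Int) - (ls.countP (fun l => !pB l && pP l) : Int) := by
    omega
  simp only [hmapB, hmapC, hmapF, hmapL, hF, hL, hcode,
    PySem.Dict.insert, PySem.Dict.getD, PySem.Dict.get?, PySem.Dict.contains,
    List.find?]
  simp
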